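-- pv_equiv track=rewrite | github.com/kalkidan-hub/a2sv | Datastructure/sliding_window/minimum-consecutive-cards-to-pick-up.py | minimumCardPickup
-- ===== SOURCE A (Python) =====
-- from typing import List
--
-- def minimumCardPickup(cards: List[int]) -> int:
--     index_record = {}
--     pick = len(cards)
--
--     for i,c in enumerate(cards):
--         if c in index_record:
--             pick = min(pick,i-index_record[c])
--         index_record[c] = i
--
--     return pick + 1 if pick != len(cards) else -1
-- ===== SOURCE B (Python) =====
-- def minimumCardPickup(cards):
--     positions = {}
--     for i, c in enumerate(cards):
--         positions.setdefault(c, []).append(i)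
--     best = None
--     for idxs in positions.values():
--         for prev, cur in zip(idxs, idxs[1:]):
--             gap = cur - prev
--             if best is None or gap < best:
--                 best = gap
--     return best + 1 if best is not None else -1
-- ===== Notes on version B (the rewrite author's own statement) =====
-- stated objective: alternative
-- what changed: Replaces the single on-the-fly last-seen-index scan with a two-phase pass: first build a dict mapping each card value to the list of all its occurrence indices, then take the global minimum of consecutive-index differences within each group.
import Mathlib
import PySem

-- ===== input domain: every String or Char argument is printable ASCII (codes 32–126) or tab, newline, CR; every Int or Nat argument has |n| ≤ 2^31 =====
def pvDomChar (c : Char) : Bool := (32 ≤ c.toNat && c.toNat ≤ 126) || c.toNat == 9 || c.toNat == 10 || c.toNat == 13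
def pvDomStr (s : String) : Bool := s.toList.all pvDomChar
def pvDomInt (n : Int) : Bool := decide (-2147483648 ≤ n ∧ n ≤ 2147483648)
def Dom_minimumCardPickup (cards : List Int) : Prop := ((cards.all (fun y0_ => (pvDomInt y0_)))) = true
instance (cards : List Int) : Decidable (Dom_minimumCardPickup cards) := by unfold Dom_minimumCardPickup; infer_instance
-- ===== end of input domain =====

-- B replaces A's single on-the-fly last-seen-index scan by a grouped two-phase pass (per distinct
-- value, gather the full occurrence-index list, then take the global minimum consecutive gap);
-- an alternative decomposition of the same cost class, not claimed faster.

-- ===== PORT A =====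
def minimumCardPickup (cards : List Int) : Int :=
  let n : Int := PySem.List.len cards
  let st := (PySem.List.enumerate cards).foldl
    (fun (st : PySem.Dict Int Int × Int) (q : Int × Int) =>
      (st.1.insert q.2 q.1,
       if st.1.contains q.2 then min st.2 (q.1 - st.1.getD q.2 0) else st.2))
    (PySem.Dict.empty, n)
  if st.2 ≠ n then st.2 + 1 else -1

-- ===== PORT B =====
def minimumCardPickup_alt (cards : List Int) : Int :=
  let positions : PySem.Dict Int (List Int) :=
    (PySem.List.enumerate cards).foldl
      (fun d q => d.modify q.2 [] (fun l => l ++ [q.1])) PySem.Dict.empty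
  let best : Option Int := positions.values.foldl
    (fun best idxs =>
      (idxs.zip idxs.tail).foldl
        (fun best pc =>
          match best with
          | none => some (pc.2 - pc.1)
          | some b => if pc.2 - pc.1 < b then some (pc.2 - pc.1) else some b)
        best)
    none
  match best with
  | some b => b + 1
  | none => -1

-- ===== PRECONDITION & SPEC =====
def Spec_minimumCardPickup (cards : List Int) (out : Int) : Prop := out = minimumCardPickup_alt cards
instance (cards : List Int) (out : Int) : Decidable (Spec_minimumCardPickup cards out) := by unfold Spec_minimumCardPickup; infer_instance

-- ===== CLAIM (what is proved, stated in full; the proofs are below) =====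
def Claim_equal_minimumCardPickup : Prop := ∀ (cards : List Int), Dom_minimumCardPickup cards → Spec_minimumCardPickup cards (minimumCardPickup cards)

-- ===== LEMMAS AND PROOFS =====

-- the running option-minimum B maintains
def pvOmin (o : Option Int) (g : Int) : Option Int :=
  match o with
  | none => some g
  | some b => if g < b then some g else some b

-- consecutive differences of a list of indices
def pvGaps (l : List Int) : List Int := (l.zip l.tail).map (fun pc => pc.2 - pc.1)

-- the occurrence indices of value v in an enumerated list
def pvOcc (ps : List (Int × Int)) (v : Int) : List Int :=
  (ps.filter (fun p => p.2 == v)).map (fun p => p.1)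

-- the chronological gaps A's loop sees, starting from a last-seen dict d
def pvGapsD (d : PySem.Dict Int Int) : List (Int × Int) → List Int
  | [] => []
  | (i, c) :: t => (if d.contains c then [i - d.getD c 0] else []) ++ pvGapsD (d.insert c i) t

lemma foldA_snd (ps : List (Int × Int)) (d : PySem.Dict Int Int) (p : Int) :
    (ps.foldl (fun (st : PySem.Dict Int Int × Int) (q : Int × Int) =>
        (st.1.insert q.2 q.1,
         if st.1.contains q.2 then min st.2 (q.1 - st.1.getD q.2 0) else st.2))
      (d, p)).2 = (pvGapsD d ps).foldl min p := by
  induction ps generalizing d p with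
  | nil => rfl
  | cons q t ih =>
    obtain ⟨i, c⟩ := q
    by_cases h : d.contains c = true
    · simp [pvGapsD, h, ih]
    · simp [pvGapsD, h, ih]

lemma pvGaps_optPrefix (o : Option Int) (i : Int) (r : List Int) :
    pvGaps (o.toList ++ i :: r) = ((o.map (fun j => i - j)).toList ++ pvGaps (i :: r)) := by
  cases o <;> simp [pvGaps]

lemma head_gap_eq (d : PySem.Dict Int Int) (c i : Int) :
    (if d.contains c then [i - d.getD c 0] else []) = ((d.get? c).map (fun j => i - j)).toList := by
  by_cases h : d.contains c = true
  · cases hg : d.get? c with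
    | none =>
      rw [PySem.Dict.get?_eq_none_iff_contains] at hg
      simp [h] at hg
    | some j =>
      have := PySem.Dict.getD_of_get?_eq_some (d := d) (k := c) (d0 := 0) hg
      simp [h, this]
  · have hg : d.get? c = none := by
      rw [PySem.Dict.get?_eq_none_iff_contains]
      simpa using h
    simp [h, hg]

lemma pvOcc_cons (i c v : Int) (t : List (Int × Int)) :
    pvOcc ((i, c) :: t) v = (if c = v then [i] else []) ++ pvOcc t v := by
  by_cases h : c = v <;> simp [pvOcc, h]

lemma pvOcc_nil_of_not_mem (t : List (Int × Int)) (c : Int) (h : c ∉ t.map (fun p => p.2)) :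
    pvOcc t c = [] := by
  simp only [pvOcc, List.map_eq_nil_iff, List.filter_eq_nil_iff]
  intro p hp hpc
  exact h (List.mem_map.mpr ⟨p, hp, by simpa using hpc⟩)

lemma flatMap_congr_mem (l : List Int) (F G : Int → List Int) (h : ∀ a ∈ l, F a = G a) :
    l.flatMap F = l.flatMap G := by
  induction l with
  | nil => rfl
  | cons x t ih =>
    simp only [List.flatMap_cons, h x (by simp), ih (fun a ha => h a (by simp [ha]))]

lemma gapsD_perm (ps : List (Int × Int)) (d : PySem.Dict Int Int) :
    (pvGapsD d ps).Perm
      ((PySem.List.dedup (ps.map (fun p => p.2))).flatMap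
        (fun v => pvGaps ((d.get? v).toList ++ pvOcc ps v))) := by
  induction ps generalizing d with
  | nil => simp [pvGapsD, PySem.List.dedup]
  | cons q t ih =>
    obtain ⟨i, c⟩ := q
    set F : Int → List Int :=
      fun v => pvGaps ((d.get? v).toList ++ pvOcc ((i, c) :: t) v) with hF
    set F' : Int → List Int :=
      fun v => pvGaps (((d.insert c i).get? v).toList ++ pvOcc t v) with hF'
    set optGap : List Int := ((d.get? c).map (fun j => i - j)).toList with hoptGap
    have hFF' : ∀ v, v ≠ c → F v = F' v := by
      intro v hv
      simp only [hF, hF', pvOcc_cons, if_neg (fun h : c = v => hv h.symm),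
        PySem.Dict.get?_insert_of_ne d i hv, List.nil_append]
    have hFc : F c = optGap ++ F' c := by
      simp only [hF, hF', hoptGap, pvOcc_cons, PySem.Dict.get?_insert_self,
        Option.toList_some, List.cons_append, List.nil_append]
      exact pvGaps_optPrefix (d.get? c) i (pvOcc t c)
    have hLHS : pvGapsD d ((i, c) :: t) = optGap ++ pvGapsD (d.insert c i) t := by
      simp only [pvGapsD, head_gap_eq, hoptGap]
    have hperm1 : (pvGapsD d ((i, c) :: t)).Perm
        (optGap ++ (PySem.List.dedup (t.map (fun p => p.2))).flatMap F') := by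
      rw [hLHS]; exact (ih (d.insert c i)).append_left optGap
    have hmapcons : ((i, c) :: t).map (fun p => p.2) = c :: t.map (fun p => p.2) := by simp
    rw [hmapcons]
    by_cases hc : c ∈ t.map (fun p => p.2)
    · -- c occurs later: dedup (c :: vs) has the same members as dedup vs
      have hsame : (PySem.List.dedup (c :: t.map (fun p => p.2))).Perm
          (PySem.List.dedup (t.map (fun p => p.2))) := by
        rw [List.perm_ext_iff_of_nodup (PySem.List.nodup_dedup _) (PySem.List.nodup_dedup _)]
        intro a
        simp only [PySem.List.mem_dedup, List.mem_cons]
        constructor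
        · rintro (rfl | h) <;> [exact hc; exact h]
        · exact Or.inr
      have hcd : c ∈ PySem.List.dedup (t.map (fun p => p.2)) := by
        rw [PySem.List.mem_dedup]; exact hc
      have hE : (PySem.List.dedup (t.map (fun p => p.2))).Perm
          (c :: (PySem.List.dedup (t.map (fun p => p.2))).erase c) :=
        List.perm_cons_erase hcd
      have hne : ∀ v ∈ (PySem.List.dedup (t.map (fun p => p.2))).erase c, v ≠ c := by
        intro v hv
        exact (((PySem.List.nodup_dedup _).mem_erase_iff).mp hv).1
      have hcongr : ((PySem.List.dedup (t.map (fun p => p.2))).erase c).flatMap F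
          = ((PySem.List.dedup (t.map (fun p => p.2))).erase c).flatMap F' :=
        flatMap_congr_mem _ _ _ (fun a ha => hFF' a (hne a ha))
      have h2 : ((PySem.List.dedup (c :: t.map (fun p => p.2))).flatMap F).Perm
          ((c :: (PySem.List.dedup (t.map (fun p => p.2))).erase c).flatMap F) :=
        (hsame.trans hE).flatMap (fun a _ => List.Perm.refl _)
      have h3 : (optGap ++ (PySem.List.dedup (t.map (fun p => p.2))).flatMap F').Perm
          (optGap ++ (c :: (PySem.List.dedup (t.map (fun p => p.2))).erase c).flatMap F') :=
        (hE.flatMap (fun a _ => List.Perm.refl _)).append_left optGap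
      have heq : optGap ++ (c :: (PySem.List.dedup (t.map (fun p => p.2))).erase c).flatMap F'
          = (c :: (PySem.List.dedup (t.map (fun p => p.2))).erase c).flatMap F := by
        simp only [List.flatMap_cons, hcongr, hFc, List.append_assoc]
      exact hperm1.trans (h3.trans (heq.symm ▸ h2.symm))
    · -- c does not occur later: dedup (c :: vs) ~ c :: dedup vs, and F' c = []
      have hocc : pvOcc t c = [] := pvOcc_nil_of_not_mem t c hc
      have hF'c : F' c = [] := by
        simp [hF', hocc, PySem.Dict.get?_insert_self, pvGaps]
      have hFc' : F c = optGap := by rw [hFc, hF'c, List.append_nil]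
      have hcdn : c ∉ PySem.List.dedup (t.map (fun p => p.2)) := by
        rw [PySem.List.mem_dedup]; exact hc
      have hsame : (PySem.List.dedup (c :: t.map (fun p => p.2))).Perm
          (c :: PySem.List.dedup (t.map (fun p => p.2))) := by
        rw [List.perm_ext_iff_of_nodup (PySem.List.nodup_dedup _)
          (List.nodup_cons.mpr ⟨hcdn, PySem.List.nodup_dedup _⟩)]
        intro a
        simp
      have hcongr : (PySem.List.dedup (t.map (fun p => p.2))).flatMap F
          = (PySem.List.dedup (t.map (fun p => p.2))).flatMap F' :=
        flatMap_congr_mem _ _ _ (fun a ha => hFF' a (fun h => hcdn (h ▸ ha)))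
      have h2 : ((PySem.List.dedup (c :: t.map (fun p => p.2))).flatMap F).Perm
          ((c :: PySem.List.dedup (t.map (fun p => p.2))).flatMap F) :=
        hsame.flatMap (fun a _ => List.Perm.refl _)
      have heq : optGap ++ (PySem.List.dedup (t.map (fun p => p.2))).flatMap F'
          = (c :: PySem.List.dedup (t.map (fun p => p.2))).flatMap F := by
        simp only [List.flatMap_cons, hcongr, hFc']
      exact hperm1.trans (heq.symm ▸ h2.symm)

lemma pvOcc_append (ps : List (Int × Int)) (i c v : Int) :
    pvOcc (ps ++ [(i, c)]) v = pvOcc ps v ++ (if c = v then [i] else []) := by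
  by_cases h : c = v <;> simp [pvOcc, List.filter_append, h]

lemma dedup_append_singleton (vs : List Int) (c : Int) :
    PySem.List.dedup (vs ++ [c])
      = if c ∈ vs then PySem.List.dedup vs else PySem.List.dedup vs ++ [c] := by
  have hmem : ((PySem.List.dedup vs).contains c = true) ↔ c ∈ vs := by
    simp
  simp only [PySem.List.dedup, PySem.Set.ofList, List.foldl_append, List.foldl_cons,
    List.foldl_nil, PySem.Set.add] at *
  split_ifs with h1 h2 h3
  · rfl
  · exact absurd (hmem.mp h1) h2
  · exact absurd (hmem.mpr h3) h1
  · rfl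

-- the first pass of B builds exactly the per-value occurrence table, keyed in first-seen order
lemma build_items (ps : List (Int × Int)) :
    (ps.foldl (fun (d : PySem.Dict Int (List Int)) q => d.modify q.2 [] (fun l => l ++ [q.1]))
        PySem.Dict.empty).items
      = (PySem.List.dedup (ps.map (fun p => p.2))).map (fun v => (v, pvOcc ps v)) := by
  induction ps using List.reverseRecOn with
  | nil => rfl
  | append_singleton ps q ih =>
    obtain ⟨i, c⟩ := q
    rw [List.foldl_append, List.foldl_cons, List.foldl_nil]
    set D : PySem.Dict Int (List Int) :=
      ps.foldl (fun d q => d.modify q.2 [] (fun l => l ++ [q.1])) PySem.Dict.empty with hD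
    have hkeys : D.keys = PySem.List.dedup (ps.map (fun p => p.2)) := by
      show D.items.map Prod.fst = _
      rw [ih, List.map_map]
      have hid : (Prod.fst ∘ fun v : Int => (v, pvOcc ps v)) = id := rfl
      rw [hid, List.map_id]
    have hnodup : D.keys.Nodup := by rw [hkeys]; exact PySem.List.nodup_dedup _
    have hmaps : (ps ++ [(i, c)]).map (fun p => p.2) = ps.map (fun p => p.2) ++ [c] := by simp
    rw [hmaps]
    change (D.insert c (D.getD c [] ++ [i])).items = _
    by_cases hc : c ∈ ps.map (fun p => p.2)
    · have hcont : D.contains c = true := by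
        rw [PySem.Dict.contains_iff_mem_keys, hkeys, PySem.List.mem_dedup]; exact hc
      have hgetD : D.getD c [] = pvOcc ps c := by
        refine PySem.Dict.getD_of_mem_items D ?_ hnodup []
        rw [ih]
        exact List.mem_map.mpr ⟨c, (PySem.List.mem_dedup _ _).mpr hc, rfl⟩
      rw [PySem.Dict.items_insert_of_contains D _ hcont, ih,
        dedup_append_singleton, if_pos hc, List.map_map]
      refine List.map_congr_left ?_
      intro v hv
      by_cases hvc : v = c
      · subst hvc
        simp [pvOcc_append, hgetD]
      · simp [Function.comp, pvOcc_append, hvc,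
          if_neg (fun h : c = v => hvc h.symm)]
    · have hcont : D.contains c = false :=
        Bool.eq_false_iff.mpr (fun h => hc
          (by rwa [PySem.Dict.contains_iff_mem_keys, hkeys, PySem.List.mem_dedup] at h))
      have hgetD : D.getD c [] = [] := PySem.Dict.getD_of_not_contains D [] hcont
      rw [PySem.Dict.items_insert_of_not_contains D _ hcont, ih,
        dedup_append_singleton, if_neg hc, List.map_append]
      congr 1
      · refine List.map_congr_left ?_
        intro v hv
        have hvc : v ≠ c := fun h => hc (h ▸ ((PySem.List.mem_dedup _ _).mp hv))
        simp [pvOcc_append, if_neg (fun h : c = v => hvc h.symm)]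
      · have hoccc : pvOcc ps c = [] := pvOcc_nil_of_not_mem ps c hc
        simp [pvOcc_append, hgetD, hoccc]

-- B's inner loop over consecutive pairs is the option-min fold over the gap list
lemma inner_fold_eq (idxs : List Int) (o : Option Int) :
    (idxs.zip idxs.tail).foldl
      (fun best pc =>
        match best with
        | none => some (pc.2 - pc.1)
        | some b => if pc.2 - pc.1 < b then some (pc.2 - pc.1) else some b) o
    = (pvGaps idxs).foldl pvOmin o := by
  rw [pvGaps, List.foldl_map]
  rfl

-- B's nested fold over the grouped index lists, as one option-min fold over the flattened gap list
lemma foldl_inner_map (l : List Int) (h : Int → List Int) (o : Option Int) :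
    (l.map h).foldl
      (fun best idxs =>
        (idxs.zip idxs.tail).foldl
          (fun best pc =>
            match best with
            | none => some (pc.2 - pc.1)
            | some b => if pc.2 - pc.1 < b then some (pc.2 - pc.1) else some b)
          best) o
    = (l.flatMap (fun v => pvGaps (h v))).foldl pvOmin o := by
  induction l generalizing o with
  | nil => rfl
  | cons x t ih =>
    rw [List.map_cons, List.foldl_cons, inner_fold_eq, List.flatMap_cons,
      List.foldl_append, ih]

lemma foldl_omin_some (G : List Int) (p : Int) :
    G.foldl pvOmin (some p) = some (G.foldl min p) := by
  induction G generalizing p with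
  | nil => rfl
  | cons g t ih =>
    have : pvOmin (some p) g = some (min p g) := by
      simp only [pvOmin]; split_ifs with h <;> simp [min_def] <;> omega
    simp [this, ih]

lemma foldl_min_le (t : List Int) (a : Int) : t.foldl min a ≤ a := by
  induction t generalizing a with
  | nil => simp
  | cons g r ih => exact le_trans (ih (min a g)) (min_le_left a g)

lemma mem_occ_bounds (cards : List Int) (v x : Int)
    (h : x ∈ pvOcc (PySem.List.enumerate cards) v) :
    0 ≤ x ∧ x < (cards.length : Int) := by
  simp only [pvOcc, List.mem_map, List.mem_filter] at h
  obtain ⟨p, ⟨hp, _⟩, rfl⟩ := h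
  rw [PySem.List.mem_enumerate_iff] at hp
  obtain ⟨k, hk, rfl⟩ := hp
  simp only [zero_add]
  omega

lemma mem_gaps_lt (cards : List Int) (g : Int)
    (h : g ∈ (PySem.List.dedup cards).flatMap
      (fun v => pvGaps (pvOcc (PySem.List.enumerate cards) v))) :
    g < (cards.length : Int) := by
  simp only [List.mem_flatMap] at h
  obtain ⟨v, _, hg⟩ := h
  simp only [pvGaps, List.mem_map] at hg
  obtain ⟨pc, hpc, rfl⟩ := hg
  have hmem := List.of_mem_zip hpc
  have h1 := mem_occ_bounds cards v pc.1 hmem.1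
  have h2 := mem_occ_bounds cards v pc.2 (List.mem_of_mem_tail hmem.2)
  omega

-- ===== VERDICT (by name: the statement is the Claim_ definition above) =====
theorem minimumCardPickup_spec : Claim_equal_minimumCardPickup := by
  intro cards _
  unfold Spec_minimumCardPickup minimumCardPickup minimumCardPickup_alt
  simp only []
  -- name the two gap lists
  set n : Int := PySem.List.len cards with hn
  set GB : List Int := (PySem.List.dedup cards).flatMap
    (fun v => pvGaps (pvOcc (PySem.List.enumerate cards) v)) with hGB
  -- A's accumulator is the min-fold over its chronological gap list
  have hA : ((PySem.List.enumerate cards).foldl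
      (fun (st : PySem.Dict Int Int × Int) (q : Int × Int) =>
        (st.1.insert q.2 q.1,
         if st.1.contains q.2 then min st.2 (q.1 - st.1.getD q.2 0) else st.2))
      (PySem.Dict.empty, n)).2
      = (pvGapsD PySem.Dict.empty (PySem.List.enumerate cards)).foldl min n :=
    foldA_snd _ _ _
  -- A's gap list is a permutation of B's grouped gap list
  have hperm : (pvGapsD PySem.Dict.empty (PySem.List.enumerate cards)).Perm GB := by
    have := gapsD_perm (PySem.List.enumerate cards) PySem.Dict.empty
    simpa [PySem.List.map_snd_enumerate, PySem.Dict.get?_empty, hGB] using this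
  have hmin : (pvGapsD PySem.Dict.empty (PySem.List.enumerate cards)).foldl min n
      = GB.foldl min n :=
    hperm.foldl_eq' (fun x _ y _ z => min_right_comm z x y) n
  -- B's first pass builds the occurrence table; its values are the grouped index lists
  have hvals : ((PySem.List.enumerate cards).foldl
      (fun (d : PySem.Dict Int (List Int)) q => d.modify q.2 [] (fun l => l ++ [q.1]))
      PySem.Dict.empty).values
      = (PySem.List.dedup cards).map (fun v => pvOcc (PySem.List.enumerate cards) v) := by
    show (((PySem.List.enumerate cards).foldl
      (fun (d : PySem.Dict Int (List Int)) q => d.modify q.2 [] (fun l => l ++ [q.1]))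
      PySem.Dict.empty).items).map Prod.snd = _
    rw [build_items, PySem.List.map_snd_enumerate, List.map_map]
    simp
  -- B's nested pass is the option-min fold over GB
  have hB : (((PySem.List.enumerate cards).foldl
      (fun (d : PySem.Dict Int (List Int)) q => d.modify q.2 [] (fun l => l ++ [q.1]))
      PySem.Dict.empty).values.foldl
      (fun best idxs =>
        (idxs.zip idxs.tail).foldl
          (fun best pc =>
            match best with
            | none => some (pc.2 - pc.1)
            | some b => if pc.2 - pc.1 < b then some (pc.2 - pc.1) else some b)
          best)
      none)
      = GB.foldl pvOmin none := by
    rw [hvals, foldl_inner_map, hGB]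
  rw [hA, hmin, hB]
  -- case on whether any gap exists
  cases hG : GB with
  | nil => simp
  | cons g t =>
    have hgn : g < n := by
      rw [hn, PySem.List.len]
      exact mem_gaps_lt cards g (by rw [← hGB, hG]; simp)
    have hle : t.foldl min g ≤ g := foldl_min_le t g
    have e1 : List.foldl min n (g :: t) = List.foldl min g t := by
      simp only [List.foldl_cons, min_eq_right (le_of_lt hgn)]
    have e2 : List.foldl pvOmin none (g :: t) = some (List.foldl min g t) := by
      simp only [List.foldl_cons, pvOmin, foldl_omin_some]
    rw [e1, e2, if_pos (by omega : List.foldl min g t ≠ n)]
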